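-- pv_equiv track=rewrite | github.com/edgarasliberis/bioinformatics-exercises | Supervision1/Folding.py | nussinov_fold
-- ===== SOURCE A (Python) =====
-- class Ptr:
--     Match, LUnmatch, RUnmatch, Bifurcation = range(4)
--
-- def is_pair(a, b):
--     return int((a, b) in [('A', 'U'), ('U', 'A'), ('G', 'C'), ('C', 'G')])
--
-- def nussinov_fold(a):
--     D = [[0 for j in range(len(a))]
--             for i in range(len(a))]
--     P = [[0 for j in range(len(a))]
--             for i in range(len(a))]
--     B = [[0 for j in range(len(a))]
--             for i in range(len(a))]
--
--     # Fill in the matrix going backwards in rows, and then in order of columns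
-- #    for l in range(1, len(a)):
-- #        for i in range(0, len(a) - l):
-- #            j = i + l
--     for i in range(len(a) - 2, -1, -1):
--         for j in range(i+1, len(a)):
--             # Candidates for a maximum: match, l unmatch, r unmatch, bifurcation
--             candidates = [D[i+1][j-1] + is_pair(a[i], a[j]), D[i+1][j], D[i][j-1]] + [D[i][k] + D[k+1][j] for k in range(i+1, j)]
--             D[i][j] = max(candidates)
--             max_idx = candidates.index(D[i][j])
--             # If bifurcation yielded maximum result
--             if max_idx > 2:
--                 P[i][j] = Ptr.Bifurcation
--                 B[i][j] = max_idx - 2 + i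
--             else:
--                 P[i][j] = max_idx # Match, LUnmatch, RUnmatch
--     return D, P, B
-- ===== SOURCE B (Python) =====
-- def nussinov_fold(a):
--     # Top-down, demand-driven memoized evaluation driven by an explicit
--     # two-phase DFS stack (expand frame / compute frame), instead of A's
--     # bottom-up tabulation with a double loop over the preallocated triangle.
--     n = len(a)
--     D = [[0] * n for _ in range(n)]
--     P = [[0] * n for _ in range(n)]
--     B = [[0] * n for _ in range(n)]
--     if n == 0:
--         return D, P, B
--     pairs = {('A', 'U'), ('U', 'A'), ('G', 'C'), ('C', 'G')}
--     memo = {}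
--     stack = [(0, n - 1, False)]
--     while stack:
--         i, j, ready = stack.pop()
--         if ready:
--             # all dependencies are memoized by now: compute this cell
--             cands = [memo[(i + 1, j - 1)] + (1 if (a[i], a[j]) in pairs else 0),
--                      memo[(i + 1, j)], memo[(i, j - 1)]] + \
--                     [memo[(i, k)] + memo[(k + 1, j)] for k in range(i + 1, j)]
--             best = max(cands)
--             idx = cands.index(best)
--             D[i][j] = best
--             if idx > 2:
--                 P[i][j] = 3  # Ptr.Bifurcation
--                 B[i][j] = idx - 2 + i
--             else:
--                 P[i][j] = idx
--             memo[(i, j)] = best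
--         elif (i, j) in memo:
--             pass
--         elif i >= j:
--             memo[(i, j)] = 0
--         else:
--             # expand: re-push as a compute frame below its dependencies
--             stack.append((i, j, True))
--             stack.append((i + 1, j - 1, False))
--             stack.append((i + 1, j, False))
--             stack.append((i, j - 1, False))
--             for k in range(i + 1, j):
--                 stack.append((i, k, False))
--                 stack.append((k + 1, j, False))
--     return D, P, B
-- ===== Notes on version B (the rewrite author's own statement) =====
-- stated objective: alternative
-- what changed: Replaces A's bottom-up tabulation (double loop filling the triangle in reverse row order) with top-down demand-driven memoized evaluation: an explicit two-phase DFS stack of expand/compute frames starting from the root cell (0,n-1), with results cached in a dictionary keyed by (i,j).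
import Mathlib
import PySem

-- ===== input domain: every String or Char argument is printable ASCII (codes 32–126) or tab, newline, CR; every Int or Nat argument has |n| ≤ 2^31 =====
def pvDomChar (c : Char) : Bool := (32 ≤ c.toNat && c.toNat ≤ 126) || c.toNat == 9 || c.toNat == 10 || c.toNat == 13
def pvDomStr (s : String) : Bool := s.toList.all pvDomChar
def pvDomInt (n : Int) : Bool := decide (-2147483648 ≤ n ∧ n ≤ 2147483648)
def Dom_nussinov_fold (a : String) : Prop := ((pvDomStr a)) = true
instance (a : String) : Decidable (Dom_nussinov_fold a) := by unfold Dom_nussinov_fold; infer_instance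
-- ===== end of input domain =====

-- B replaces A's bottom-up tabulation with top-down demand-driven memoized
-- evaluation: an explicit two-phase DFS stack of expand/compute frames from the
-- root cell (0, n-1), caching results in a dictionary; same O(n^3) cost.

-- ===== PORT A =====

-- matrix cell read/write (Python D[x][y]; used only with in-range non-negative indices, where it is exact)
def mget (M : List (List Int)) (x y : Nat) : Int := (M.getD x []).getD y 0
def mset (M : List (List Int)) (x y : Nat) (v : Int) : List (List Int) := M.set x ((M.getD x []).set y v)

-- is_pair(a, b)
def isPair (x y : Char) : Int := if (x, y) ∈ [('A', 'U'), ('U', 'A'), ('G', 'C'), ('C', 'G')] then 1 else 0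

-- body of A's inner loop (one cell (i, j))
def stepACell (s : List Char) (i : Nat) (st : List (List Int) × List (List Int) × List (List Int)) (j : Nat) :
    List (List Int) × List (List Int) × List (List Int) :=
  let D := st.1
  let cands := (mget D (i+1) (j-1) + isPair (s.getD i ' ') (s.getD j ' ')) :: mget D (i+1) j :: mget D i (j-1) ::
      (List.range' (i+1) (j - (i+1))).map (fun k => mget D i k + mget D (k+1) j)
  let m := (PySem.List.max? cands (fun x => x)).getD 0
  let idx := (PySem.List.index? cands m).getD 0
  let D' := mset D i j m
  if idx > 2 then (D', mset st.2.1 i j 3, mset st.2.2 i j ((idx : Int) - 2 + (i : Int)))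
  else (D', mset st.2.1 i j (idx : Int), st.2.2)

-- A's inner loop: for j in range(i+1, len(a))
def rowA (s : List Char) (n : Nat) (st : List (List Int) × List (List Int) × List (List Int)) (i : Nat) :
    List (List Int) × List (List Int) × List (List Int) :=
  (List.range' (i+1) (n - (i+1))).foldl (stepACell s i) st

def nussinov_fold (a : String) : List (List Int) × List (List Int) × List (List Int) :=
  let s := a.toList
  let n := s.length
  let z := List.replicate n (List.replicate n (0 : Int))
  -- for i in range(len(a)-2, -1, -1) : i = n-2, ..., 0
  ((List.range (n-1)).reverse).foldl (rowA s n) (z, z, z)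

-- ===== PORT B =====

def pairsSet : PySem.Set (Char × Char) := PySem.Set.ofList [('A', 'U'), ('U', 'A'), ('G', 'C'), ('C', 'G')]

-- the dependency cells pushed by an expand frame, in push order
def bDepCells (i j : Nat) : List (Nat × Nat) :=
  [(i+1, j-1), (i+1, j), (i, j-1)] ++
    (List.range' (i+1) (j - (i+1))).flatMap (fun k => [(i, k), (k+1, j)])

def bDeps (i j : Nat) : List (Nat × Nat × Bool) := (bDepCells i j).map (fun c => (c.1, c.2, false))

-- termination measure for the DFS stack loop: a weight per frame, exponential in the span
def Fw : Nat → Nat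
  | 0 => 2
  | s+1 => (2*s+4) * Fw s

def frWt : Nat × Nat × Bool → Nat
  | (i, j, r) => if r then 1 else Fw (j - i)

def stkWt (st : List (Nat × Nat × Bool)) : Nat := (st.map frWt).sum

lemma Fw_two (s : Nat) : 2 ≤ Fw s := by
  induction s with
  | zero => simp [Fw]
  | succ s ih => calc 2 ≤ Fw s := ih
                   _ ≤ (2*s+4) * Fw s := Nat.le_mul_of_pos_left _ (by omega)
                   _ = Fw (s+1) := rfl

lemma Fw_mono {s t : Nat} (h : s ≤ t) : Fw s ≤ Fw t := by
  induction t with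
  | zero => obtain rfl : s = 0 := by omega
            exact le_refl _
  | succ t ih =>
    rcases Nat.lt_or_ge s (t+1) with hlt | hge
    · calc Fw s ≤ Fw t := ih (by omega)
        _ ≤ (2*t+4) * Fw t := Nat.le_mul_of_pos_left _ (by omega)
        _ = Fw (t+1) := rfl
    · have : s = t+1 := by omega
      rw [this]

lemma stkWt_cons (f : Nat × Nat × Bool) (st : List (Nat × Nat × Bool)) :
    stkWt (f :: st) = frWt f + stkWt st := by simp [stkWt]

lemma stkWt_append (l1 l2 : List (Nat × Nat × Bool)) :
    stkWt (l1 ++ l2) = stkWt l1 + stkWt l2 := by simp [stkWt]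

lemma stkWt_reverse (l : List (Nat × Nat × Bool)) : stkWt l.reverse = stkWt l := by
  simp [stkWt, List.map_reverse]

lemma stkWt_le (l : List (Nat × Nat × Bool)) (W : Nat) (h : ∀ f ∈ l, frWt f ≤ W) :
    stkWt l ≤ l.length * W := by
  induction l with
  | nil => simp [stkWt]
  | cons f l ih =>
    rw [stkWt_cons, List.length_cons, Nat.succ_mul]
    have h1 := h f (List.mem_cons_self ..)
    have h2 := ih (fun g hg => h g (List.mem_cons_of_mem _ hg))
    omega

lemma bDeps_length (i j : Nat) (hij : i < j) : (bDeps i j).length = 3 + 2 * (j - i - 1) := by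
  simp only [bDeps, bDepCells, List.length_map, List.length_append, List.length_flatMap]
  have : ∀ k : Nat, ([((i : Nat), k), (k+1, j)] : List (Nat × Nat)).length = 2 := fun _ => rfl
  simp only [List.length_cons, List.length_nil]
  rw [List.map_const']
  simp [List.sum_replicate, List.length_range']
  omega

lemma bDeps_wt (i j : Nat) (hij : i < j) : stkWt (bDeps i j) + 1 < Fw (j - i) := by
  have hW : ∀ f ∈ bDeps i j, frWt f ≤ Fw (j - i - 1) := by
    intro f hf
    simp only [bDeps, List.mem_map] at hf
    obtain ⟨c, hc, rfl⟩ := hf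
    simp only [bDepCells, List.mem_append, List.mem_cons, List.mem_flatMap, List.mem_range'] at hc
    have hspan : c.2 - c.1 ≤ j - i - 1 := by
      rcases hc with (rfl | rfl | rfl | h) | ⟨k, ⟨t, ht, rfl⟩, hk⟩
      · simp; omega
      · simp; omega
      · simp; omega
      · simp at h
      · simp at hk
        rcases hk with rfl | rfl <;> simp <;> omega
    exact le_trans (by simp [frWt]) (Fw_mono hspan)
  have hsum := stkWt_le (bDeps i j) (Fw (j - i - 1)) hW
  rw [bDeps_length i j hij] at hsum
  have hFw : Fw (j - i) = (2 * (j - i - 1) + 4) * Fw (j - i - 1) := by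
    have h1 : j - i = (j - i - 1) + 1 := by omega
    rw [h1]; rfl
  have h2 := Fw_two (j - i - 1)
  rw [hFw]
  nlinarith

-- one compute frame: read the memoized dependencies, take first max, write the three matrices
-- (Python reads memo[key]; the port reads with default 0 — exact, since the key is always
-- present when a compute frame runs, as the invariant in the proofs below establishes)
def readyCell (s : List Char) (memo : PySem.Dict (Nat × Nat) Int)
    (mats : List (List Int) × List (List Int) × List (List Int)) (i j : Nat) :
    PySem.Dict (Nat × Nat) Int × (List (List Int) × List (List Int) × List (List Int)) :=
  let get := fun (p : Nat × Nat) => (memo.get? p).getD 0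
  let cands := (get (i+1, j-1) + (if PySem.Set.contains pairsSet (s.getD i ' ', s.getD j ' ') then (1 : Int) else 0)) ::
      get (i+1, j) :: get (i, j-1) ::
      (List.range' (i+1) (j - (i+1))).map (fun k => get (i, k) + get (k+1, j))
  let best := (PySem.List.max? cands (fun x => x)).getD 0
  let idx := (PySem.List.index? cands best).getD 0
  let D' := mset mats.1 i j best
  let mats' := if idx > 2 then (D', mset mats.2.1 i j 3, mset mats.2.2 i j ((idx : Int) - 2 + (i : Int)))
               else (D', mset mats.2.1 i j (idx : Int), mats.2.2)
  (memo.insert (i, j) best, mats')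

-- the while-stack loop (stack top = list head)
def runB (s : List Char) (memo : PySem.Dict (Nat × Nat) Int)
    (mats : List (List Int) × List (List Int) × List (List Int)) :
    List (Nat × Nat × Bool) → PySem.Dict (Nat × Nat) Int × (List (List Int) × List (List Int) × List (List Int))
  | [] => (memo, mats)
  | (i, j, ready) :: rest =>
    if ready then
      let r := readyCell s memo mats i j
      runB s r.1 r.2 rest
    else if (memo.get? (i, j)).isSome then
      runB s memo mats rest
    else if j ≤ i then
      runB s (memo.insert (i, j) 0) mats rest
    else
      runB s memo mats ((bDeps i j).reverse ++ (i, j, true) :: rest)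
termination_by st => stkWt st
decreasing_by
  · rw [stkWt_cons]; have := Fw_two (j - i); simp only [frWt]; split <;> omega
  · rw [stkWt_cons]; have := Fw_two (j - i); simp only [frWt]; split <;> omega
  · rw [stkWt_cons]; have := Fw_two (j - i); simp only [frWt]; split <;> omega
  · rename_i h1 h2 h3
    have hij : i < j := by omega
    have hb := bDeps_wt i j hij
    rw [stkWt_append, stkWt_reverse, stkWt_cons, stkWt_cons]
    have hr : frWt (i, j, ready) = Fw (j - i) := by simp [frWt, h1]
    have ht : frWt (i, j, true) = 1 := by simp [frWt]
    rw [hr, ht]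
    omega

def nussinov_fold_alt (a : String) : List (List Int) × List (List Int) × List (List Int) :=
  let s := a.toList
  let n := s.length
  let z := List.replicate n (List.replicate n (0 : Int))
  if n = 0 then (z, z, z)
  else (runB s PySem.Dict.empty (z, z, z) [(0, n - 1, false)]).2

-- ===== PRECONDITION & SPEC =====
def Spec_nussinov_fold (a : String) (out : List (List Int) × List (List Int) × List (List Int)) : Prop := out = nussinov_fold_alt a
instance (a : String) (out : List (List Int) × List (List Int) × List (List Int)) : Decidable (Spec_nussinov_fold a out) := by unfold Spec_nussinov_fold; infer_instance

-- ===== CLAIM (what is proved, stated in full; the proofs are below) =====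
def Claim_equal_nussinov_fold : Prop := ∀ (a : String), Dom_nussinov_fold a → Spec_nussinov_fold a (nussinov_fold a)

-- ===== LEMMAS AND PROOFS =====

-- D[i][j] of the finished table, by well-founded recursion on the gap j - i
def dspec (s : List Char) (i j : Nat) : Int :=
  if j ≤ i then 0
  else
    let rest := (List.range' (i+1) (j - (i+1))).attach.map
        (fun k => dspec s i k.1 + dspec s (k.1+1) j)
    let cands := (dspec s (i+1) (j-1) + isPair (s.getD i ' ') (s.getD j ' ')) :: dspec s (i+1) j :: dspec s i (j-1) :: rest
    (PySem.List.max? cands (fun x => x)).getD 0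
termination_by j - i
decreasing_by
  all_goals first
    | omega
    | (obtain ⟨t, ht, hte⟩ := List.mem_range'.mp k.2; omega)

def candsSpec (s : List Char) (i j : Nat) : List Int :=
  (dspec s (i+1) (j-1) + isPair (s.getD i ' ') (s.getD j ' ')) :: dspec s (i+1) j :: dspec s i (j-1) ::
    (List.range' (i+1) (j - (i+1))).map (fun k => dspec s i k + dspec s (k+1) j)

def mspec (s : List Char) (i j : Nat) : Int := (PySem.List.max? (candsSpec s i j) (fun x => x)).getD 0
def idxspec (s : List Char) (i j : Nat) : Nat := (PySem.List.index? (candsSpec s i j) (mspec s i j)).getD 0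
def pspec (s : List Char) (i j : Nat) : Int := if idxspec s i j > 2 then 3 else (idxspec s i j : Int)
def bspec (s : List Char) (i j : Nat) : Int := if idxspec s i j > 2 then (idxspec s i j : Int) - 2 + (i : Int) else 0

lemma dspec_lower (s : List Char) (i j : Nat) (h : j ≤ i) : dspec s i j = 0 := by
  rw [dspec]; simp [h]

lemma dspec_eq (s : List Char) (i j : Nat) (h : i < j) : dspec s i j = mspec s i j := by
  rw [dspec, if_neg (by omega : ¬ j ≤ i)]
  unfold mspec candsSpec
  first
    | exact List.attach_map_coe _ _
    | simp

-- square matrix as a function of indices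
def build (n : Nat) (f : Nat → Nat → Int) : List (List Int) :=
  (List.range n).map (fun x => (List.range n).map (fun y => f x y))

lemma getElem_build (n : Nat) (f : Nat → Nat → Int) (p : Nat) (hp : p < (build n f).length) :
    (build n f)[p] = (List.range n).map (f p) := by
  simp [build] at hp ⊢

lemma mget_build (n : Nat) (f : Nat → Nat → Int) (x y : Nat) (hx : x < n) (hy : y < n) :
    mget (build n f) x y = f x y := by
  simp [mget, build, List.getD_eq_getElem?_getD, List.getElem?_map, List.getElem?_range, hx, hy]

lemma mset_build (n : Nat) (f : Nat → Nat → Int) (x y : Nat) (v : Int) (hx : x < n) (hy : y < n) :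
    mset (build n f) x y v = build n (fun p q => if p = x ∧ q = y then v else f p q) := by
  have hrow : (build n f).getD x [] = (List.range n).map (f x) := by
    simp [build, List.getD_eq_getElem?_getD, List.getElem?_map, List.getElem?_range, hx]
  unfold mset
  rw [hrow]
  apply List.ext_getElem
  · simp [build]
  · intro p hp hp'
    have hpn : p < n := by simpa [build] using hp'
    rw [getElem_build n _ p hp', List.getElem_set]
    by_cases hpx : x = p
    · subst hpx
      rw [if_pos rfl]
      apply List.ext_getElem
      · simp
      · intro q hq hq'
        have hqn : q < n := by simpa using hq'
        rw [List.getElem_set]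
        by_cases hqy : y = q
        · subst hqy
          rw [if_pos rfl, List.getElem_map, List.getElem_range, if_pos ⟨rfl, rfl⟩]
        · rw [if_neg hqy, List.getElem_map, List.getElem_range,
              List.getElem_map, List.getElem_range, if_neg (by tauto)]
    · rw [if_neg hpx, getElem_build n f p (by simpa [build] using hpn)]
      exact List.map_congr_left (fun q _ => by rw [if_neg (by tauto)])

lemma build_congr (n : Nat) (f g : Nat → Nat → Int) (h : ∀ x, x < n → ∀ y, y < n → f x y = g x y) :
    build n f = build n g := by
  unfold build
  apply List.map_congr_left
  intro x hx
  apply List.map_congr_left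
  intro y hy
  exact h x (List.mem_range.mp hx) y (List.mem_range.mp hy)

-- the three-matrix state when exactly the upper cells satisfying c have been filled
def stT (s : List Char) (n : Nat) (c : Nat → Nat → Prop) [∀ x y, Decidable (c x y)] :
    List (List Int) × List (List Int) × List (List Int) :=
  (build n (fun x y => if c x y ∧ x < y then dspec s x y else 0),
   build n (fun x y => if c x y ∧ x < y then pspec s x y else 0),
   build n (fun x y => if c x y ∧ x < y then bspec s x y else 0))

lemma stT_congr (s : List Char) (n : Nat) (c c' : Nat → Nat → Prop)
    [∀ x y, Decidable (c x y)] [∀ x y, Decidable (c' x y)]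
    (h : ∀ x y, x < n → y < n → x < y → (c x y ↔ c' x y)) : stT s n c = stT s n c' := by
  have key : ∀ (v : Nat → Nat → Int),
      build n (fun x y => if c x y ∧ x < y then v x y else 0)
        = build n (fun x y => if c' x y ∧ x < y then v x y else 0) := by
    intro v
    apply build_congr
    intro x hx y hy
    by_cases hxy : x < y
    · rw [if_congr (and_congr_left (fun _ => h x y hx hy hxy)) rfl rfl]
    · rw [if_neg (fun hh => hxy hh.2), if_neg (fun hh => hxy hh.2)]
  unfold stT
  rw [key, key, key]

lemma zeros_eq_stT (s : List Char) (n : Nat) (c : Nat → Nat → Prop) [∀ x y, Decidable (c x y)]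
    (h : ∀ x y, x < n → y < n → x < y → ¬ c x y) :
    (List.replicate n (List.replicate n (0 : Int)), List.replicate n (List.replicate n (0 : Int)),
      List.replicate n (List.replicate n (0 : Int))) = stT s n c := by
  have hz : List.replicate n (List.replicate n (0 : Int)) = build n (fun _ _ => 0) := by
    apply List.ext_getElem
    · simp [build]
    · intro p hp hp'
      rw [List.getElem_replicate, getElem_build]
      apply List.ext_getElem
      · simp
      · intro q hq hq'
        simp
  have key : ∀ (v : Nat → Nat → Int),
      build n (fun _ _ => (0 : Int)) = build n (fun x y => if c x y ∧ x < y then v x y else 0) := by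
    intro v
    apply build_congr
    intro x hx y hy
    by_cases hxy : x < y
    · rw [if_neg (fun hh => h x y hx hy hxy hh.1)]
    · rw [if_neg (fun hh => hxy hh.2)]
  unfold stT
  rw [hz]
  simp only [Prod.mk.injEq]
  exact ⟨key _, key _, key _⟩

-- if-membership in the Python pair set equals is_pair
lemma pairContains (x y : Char) :
    (if PySem.Set.contains pairsSet (x, y) then (1 : Int) else 0) = isPair x y := by
  have h : pairsSet = [('A', 'U'), ('U', 'A'), ('G', 'C'), ('C', 'G')] := by decide
  rw [h, isPair]
  by_cases hm : (x, y) ∈ [('A', 'U'), ('U', 'A'), ('G', 'C'), ('C', 'G')]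
  · rw [if_pos hm, if_pos (by simpa [PySem.Set.contains] using hm)]
  · rw [if_neg hm, if_neg (by simpa [PySem.Set.contains] using hm)]

-- one A-cell preserves the invariant
lemma cellA (s : List Char) (n i j : Nat) (c : Nat → Nat → Prop) [∀ x y, Decidable (c x y)]
    (hi1 : i+1 < n) (hij : i < j) (hjn : j < n)
    (Hdep : ∀ x y, x < n → y < n → x < y → (i < x ∨ (x = i ∧ y < j)) → c x y)
    (Hself : ¬ c i j) :
    stepACell s i (stT s n c) j = stT s n (fun x y => c x y ∨ (x = i ∧ y = j)) := by
  have hD : (stT s n c).1 = build n (fun x y => if c x y ∧ x < y then dspec s x y else 0) := rfl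
  have hP : (stT s n c).2.1 = build n (fun x y => if c x y ∧ x < y then pspec s x y else 0) := rfl
  have hB : (stT s n c).2.2 = build n (fun x y => if c x y ∧ x < y then bspec s x y else 0) := rfl
  have hread : ∀ x y, x < n → y < n → (i < x ∨ (x = i ∧ y < j)) →
      mget (stT s n c).1 x y = dspec s x y := by
    intro x y hx hy hdep
    rw [hD, mget_build n _ x y hx hy]
    by_cases hxy : x < y
    · rw [if_pos ⟨Hdep x y hx hy hxy hdep, hxy⟩]
    · rw [if_neg (fun h => hxy h.2), dspec_lower s x y (by omega)]
  have hcands : (mget (stT s n c).1 (i+1) (j-1) + isPair (s.getD i ' ') (s.getD j ' ')) ::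
      mget (stT s n c).1 (i+1) j :: mget (stT s n c).1 i (j-1) ::
      (List.range' (i+1) (j - (i+1))).map (fun k => mget (stT s n c).1 i k + mget (stT s n c).1 (k+1) j)
      = candsSpec s i j := by
    unfold candsSpec
    rw [hread (i+1) (j-1) (by omega) (by omega) (by omega),
        hread (i+1) j (by omega) (by omega) (by omega),
        hread i (j-1) (by omega) (by omega) (by omega)]
    have hmap : (List.range' (i+1) (j - (i+1))).map
          (fun k => mget (stT s n c).1 i k + mget (stT s n c).1 (k+1) j)
        = (List.range' (i+1) (j - (i+1))).map (fun k => dspec s i k + dspec s (k+1) j) := by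
      apply List.map_congr_left
      intro k hk
      obtain ⟨t, ht, hte⟩ := List.mem_range'.mp hk
      rw [hread i k (by omega) (by omega) (by omega), hread (k+1) j (by omega) (by omega) (by omega)]
    rw [hmap]
  simp only [stepACell]
  rw [hcands]
  have hms : (PySem.List.max? (candsSpec s i j) (fun x => x)).getD 0 = mspec s i j := rfl
  rw [hms]
  have hidx : (PySem.List.index? (candsSpec s i j) (mspec s i j)).getD 0 = idxspec s i j := rfl
  rw [hidx, hD, hP, hB]
  have hDkey : mset (build n (fun x y => if c x y ∧ x < y then dspec s x y else 0)) i j (mspec s i j)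
      = build n (fun x y => if (c x y ∨ (x = i ∧ y = j)) ∧ x < y then dspec s x y else 0) := by
    rw [mset_build n _ i j _ (by omega) hjn]
    apply build_congr
    intro x hx y hy
    by_cases hc : x = i ∧ y = j
    · obtain ⟨rfl, rfl⟩ := hc
      rw [if_pos ⟨rfl, rfl⟩, if_pos ⟨Or.inr ⟨rfl, rfl⟩, hij⟩, dspec_eq s x y hij]
    · rw [if_neg hc,
        if_congr (and_congr_left (fun _ => (or_iff_left hc).symm)) rfl rfl]
  by_cases hgt : idxspec s i j > 2
  · rw [if_pos hgt, hDkey,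
      mset_build n _ i j _ (by omega) hjn, mset_build n _ i j _ (by omega) hjn]
    simp only [stT, Prod.mk.injEq]
    refine ⟨by first | rfl | trivial, ?_, ?_⟩
    · apply build_congr
      intro x hx y hy
      by_cases hc : x = i ∧ y = j
      · obtain ⟨rfl, rfl⟩ := hc
        rw [if_pos ⟨rfl, rfl⟩, if_pos ⟨Or.inr ⟨rfl, rfl⟩, hij⟩]
        simp [pspec, hgt]
      · rw [if_neg hc,
          if_congr (and_congr_left (fun _ => (or_iff_left hc).symm)) rfl rfl]
    · apply build_congr
      intro x hx y hy
      by_cases hc : x = i ∧ y = j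
      · obtain ⟨rfl, rfl⟩ := hc
        rw [if_pos ⟨rfl, rfl⟩, if_pos ⟨Or.inr ⟨rfl, rfl⟩, hij⟩]
        simp [bspec, hgt]
      · rw [if_neg hc,
          if_congr (and_congr_left (fun _ => (or_iff_left hc).symm)) rfl rfl]
  · rw [if_neg hgt, hDkey, mset_build n _ i j _ (by omega) hjn]
    simp only [stT, Prod.mk.injEq]
    refine ⟨by first | rfl | trivial, ?_, ?_⟩
    · apply build_congr
      intro x hx y hy
      by_cases hc : x = i ∧ y = j
      · obtain ⟨rfl, rfl⟩ := hc
        rw [if_pos ⟨rfl, rfl⟩, if_pos ⟨Or.inr ⟨rfl, rfl⟩, hij⟩]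
        simp [pspec, hgt]
      · rw [if_neg hc,
          if_congr (and_congr_left (fun _ => (or_iff_left hc).symm)) rfl rfl]
    · apply build_congr
      intro x hx y hy
      by_cases hc : x = i ∧ y = j
      · obtain ⟨rfl, rfl⟩ := hc
        rw [if_neg (fun hh => Hself hh.1), if_pos ⟨Or.inr ⟨rfl, rfl⟩, hij⟩]
        simp [bspec, hgt]
      · rw [if_congr (and_congr_left (fun _ => (or_iff_left hc).symm)) rfl rfl]

lemma innerA (s : List Char) (n i : Nat) (hi1 : i + 1 < n) :
    ∀ cnt j0, i + 1 ≤ j0 → j0 + cnt = n →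
    (List.range' j0 cnt).foldl (stepACell s i)
        (stT s n (fun x y => i < x ∨ (x = i ∧ y < j0)))
      = stT s n (fun x y => i < x ∨ (x = i ∧ y < n)) := by
  intro cnt
  induction cnt with
  | zero =>
    intro j0 h1 h2
    obtain rfl : j0 = n := by omega
    simp
  | succ cnt ih =>
    intro j0 h1 h2
    rw [List.range'_succ, List.foldl_cons]
    rw [cellA s n i j0 _ hi1 (by omega) (by omega)
        (fun x y _ _ _ h => h) (by omega)]
    rw [stT_congr s n _ (fun x y => i < x ∨ (x = i ∧ y < j0 + 1))
        (fun x y _ _ _ => by omega)]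
    exact ih (j0+1) (by omega) (by omega)

lemma outerA (s : List Char) (n : Nat) : ∀ m, m < n →
    ((List.range m).reverse).foldl (rowA s n) (stT s n (fun x y => m ≤ x))
      = stT s n (fun x y => 0 ≤ x) := by
  intro m
  induction m with
  | zero => intro _; simp
  | succ m ih =>
    intro hm
    rw [List.range_succ, List.reverse_append, List.reverse_singleton, List.singleton_append,
        List.foldl_cons]
    have hrow : rowA s n (stT s n (fun x y => m + 1 ≤ x)) m = stT s n (fun x y => m ≤ x) := by
      unfold rowA
      rw [stT_congr s n _ (fun x y => m < x ∨ (x = m ∧ y < m + 1)) (fun x y _ _ _ => by omega)]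
      rw [innerA s n m hm (n - (m+1)) (m+1) (by omega) (by omega)]
      exact stT_congr s n _ _ (fun x y _ _ _ => by omega)
    rw [hrow]
    exact ih (by omega)

-- ===== B-side lemmas =====

-- the memoized-cell predicate of a memo dictionary
abbrev MS (memo : PySem.Dict (Nat × Nat) Int) : Nat → Nat → Prop :=
  fun x y => ((memo.get? (x, y)).isSome = true)

lemma MS_insert (memo : PySem.Dict (Nat × Nat) Int) (i j x y : Nat) (v : Int) :
    MS (memo.insert (i, j) v) x y ↔ MS memo x y ∨ (x = i ∧ y = j) := by
  simp only [MS, PySem.Dict.get?_insert]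
  by_cases h : (x, y) = (i, j)
  · rw [if_pos h]
    simp [Prod.ext_iff] at h
    simp [h]
  · rw [if_neg h]
    simp [Prod.ext_iff] at h
    constructor
    · exact Or.inl
    · rintro (hm | ⟨rfl, rfl⟩)
      · exact hm
      · simp at h

-- membership facts about the dependency list
lemma mem_dep_head1 (i j : Nat) : ((i+1, j-1) : Nat × Nat) ∈ bDepCells i j := by
  simp [bDepCells]
lemma mem_dep_head2 (i j : Nat) : ((i+1, j) : Nat × Nat) ∈ bDepCells i j := by
  simp [bDepCells]
lemma mem_dep_head3 (i j : Nat) : ((i, j-1) : Nat × Nat) ∈ bDepCells i j := by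
  simp [bDepCells]
lemma mem_dep_bifL (i j k : Nat) (h1 : i + 1 ≤ k) (h2 : k < j) : ((i, k) : Nat × Nat) ∈ bDepCells i j := by
  unfold bDepCells
  refine List.mem_append_right _ (List.mem_flatMap.mpr ⟨k, List.mem_range'.mpr ⟨k - (i+1), by omega, by omega⟩, by simp⟩)
lemma mem_dep_bifR (i j k : Nat) (h1 : i + 1 ≤ k) (h2 : k < j) : ((k+1, j) : Nat × Nat) ∈ bDepCells i j := by
  unfold bDepCells
  refine List.mem_append_right _ (List.mem_flatMap.mpr ⟨k, List.mem_range'.mpr ⟨k - (i+1), by omega, by omega⟩, by simp⟩)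

-- the stack discipline: every compute frame's dependencies are memoized or appear above it
def StackOK (M : Nat × Nat → Prop) : List (Nat × Nat × Bool) → Prop
  | [] => True
  | f :: rest => (f.2.2 = true → f.1 < f.2.1 ∧ ∀ d ∈ bDepCells f.1 f.2.1, M d) ∧
      StackOK (fun c => M c ∨ c = (f.1, f.2.1)) rest

lemma StackOK_mono : ∀ (st : List (Nat × Nat × Bool)) (M M' : Nat × Nat → Prop),
    (∀ c, M c → M' c) → StackOK M st → StackOK M' st := by
  intro st
  induction st with
  | nil => intro M M' _ _; trivial
  | cons f rest ih =>
    intro M M' h hok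
    obtain ⟨h1, h2⟩ := hok
    exact ⟨fun hr => ⟨(h1 hr).1, fun d hd => h d ((h1 hr).2 d hd)⟩,
      ih _ _ (fun c hc => hc.elim (fun x => Or.inl (h c x)) Or.inr) h2⟩

lemma StackOK_false_prefix : ∀ (cells : List (Nat × Nat)) (M : Nat × Nat → Prop) (st : List (Nat × Nat × Bool)),
    StackOK (fun c => M c ∨ c ∈ cells) st →
    StackOK M ((cells.map (fun c => (c.1, c.2, false))) ++ st) := by
  intro cells
  induction cells with
  | nil => intro M st h; simpa using StackOK_mono st _ M (by simp) h
  | cons c cs ih =>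
    intro M st h
    rw [List.map_cons, List.cons_append]
    refine ⟨by simp, ?_⟩
    exact ih _ _ (StackOK_mono st _ _ (by intro d hd; simp at hd ⊢; tauto) h)

-- the compute-frame reads produce exactly the candidate list of the spec
lemma candsReady (s : List Char) (i j : Nat) (memo : PySem.Dict (Nat × Nat) Int)
    (hval : ∀ x y v, memo.get? (x, y) = some v → v = dspec s x y)
    (hdeps : ∀ d ∈ bDepCells i j, (memo.get? d).isSome = true) :
    ((memo.get? (i+1, j-1)).getD 0 + (if PySem.Set.contains pairsSet (s.getD i ' ', s.getD j ' ') then (1 : Int) else 0)) ::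
      (memo.get? (i+1, j)).getD 0 :: (memo.get? (i, j-1)).getD 0 ::
      (List.range' (i+1) (j - (i+1))).map (fun k => (memo.get? (i, k)).getD 0 + (memo.get? (k+1, j)).getD 0)
    = candsSpec s i j := by
  have hread : ∀ x y, ((x, y) : Nat × Nat) ∈ bDepCells i j → (memo.get? (x, y)).getD 0 = dspec s x y := by
    intro x y hm
    have hs := hdeps _ hm
    cases h : memo.get? (x, y) with
    | none => rw [h] at hs; simp at hs
    | some v => simp [h, hval x y v h]
  unfold candsSpec
  rw [pairContains, hread (i+1) (j-1) (mem_dep_head1 i j), hread (i+1) j (mem_dep_head2 i j),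
      hread i (j-1) (mem_dep_head3 i j)]
  congr 3
  apply List.map_congr_left
  intro k hk
  obtain ⟨t, ht, hte⟩ := List.mem_range'.mp hk
  rw [hread i k (mem_dep_bifL i j k (by omega) (by omega)),
      hread (k+1) j (mem_dep_bifR i j k (by omega) (by omega))]

-- a compute frame on the spec-state produces the spec-state of the extended memo
lemma readyCell_eq (s : List Char) (n i j : Nat) (memo : PySem.Dict (Nat × Nat) Int)
    (hij : i < j) (hjn : j < n)
    (hval : ∀ x y v, memo.get? (x, y) = some v → v = dspec s x y)
    (hdeps : ∀ d ∈ bDepCells i j, (memo.get? d).isSome = true) :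
    readyCell s memo (stT s n (MS memo)) i j
      = (memo.insert (i, j) (mspec s i j), stT s n (MS (memo.insert (i, j) (mspec s i j)))) := by
  have hD : (stT s n (MS memo)).1 = build n (fun x y => if MS memo x y ∧ x < y then dspec s x y else 0) := rfl
  have hP : (stT s n (MS memo)).2.1 = build n (fun x y => if MS memo x y ∧ x < y then pspec s x y else 0) := rfl
  have hB : (stT s n (MS memo)).2.2 = build n (fun x y => if MS memo x y ∧ x < y then bspec s x y else 0) := rfl
  simp only [readyCell]
  rw [candsReady s i j memo hval hdeps]
  have hms : (PySem.List.max? (candsSpec s i j) (fun x => x)).getD 0 = mspec s i j := rfl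
  rw [hms]
  have hidx : (PySem.List.index? (candsSpec s i j) (mspec s i j)).getD 0 = idxspec s i j := rfl
  rw [hidx]
  have hstT : stT s n (MS (memo.insert (i, j) (mspec s i j)))
      = stT s n (fun x y => MS memo x y ∨ (x = i ∧ y = j)) :=
    stT_congr s n _ _ (fun x y _ _ _ => (MS_insert memo i j x y _))
  rw [hstT]
  refine (Prod.mk.injEq ..).mpr ⟨rfl, ?_⟩
  rw [hD, hP, hB]
  have hDkey : mset (build n (fun x y => if MS memo x y ∧ x < y then dspec s x y else 0)) i j (mspec s i j)
      = build n (fun x y => if (MS memo x y ∨ (x = i ∧ y = j)) ∧ x < y then dspec s x y else 0) := by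
    rw [mset_build n _ i j _ (by omega) hjn]
    apply build_congr
    intro x hx y hy
    by_cases hc : x = i ∧ y = j
    · obtain ⟨rfl, rfl⟩ := hc
      rw [if_pos ⟨rfl, rfl⟩, if_pos ⟨Or.inr ⟨rfl, rfl⟩, hij⟩, dspec_eq s x y hij]
    · rw [if_neg hc,
        if_congr (and_congr_left (fun _ => (or_iff_left hc).symm)) rfl rfl]
  by_cases hgt : idxspec s i j > 2
  · rw [if_pos hgt, hDkey,
      mset_build n _ i j _ (by omega) hjn, mset_build n _ i j _ (by omega) hjn]
    simp only [stT, Prod.mk.injEq]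
    refine ⟨by first | rfl | trivial, ?_, ?_⟩
    · apply build_congr
      intro x hx y hy
      by_cases hc : x = i ∧ y = j
      · obtain ⟨rfl, rfl⟩ := hc
        rw [if_pos ⟨rfl, rfl⟩, if_pos ⟨Or.inr ⟨rfl, rfl⟩, hij⟩]
        simp [pspec, hgt]
      · rw [if_neg hc,
          if_congr (and_congr_left (fun _ => (or_iff_left hc).symm)) rfl rfl]
    · apply build_congr
      intro x hx y hy
      by_cases hc : x = i ∧ y = j
      · obtain ⟨rfl, rfl⟩ := hc
        rw [if_pos ⟨rfl, rfl⟩, if_pos ⟨Or.inr ⟨rfl, rfl⟩, hij⟩]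
        simp [bspec, hgt]
      · rw [if_neg hc,
          if_congr (and_congr_left (fun _ => (or_iff_left hc).symm)) rfl rfl]
  · rw [if_neg hgt, hDkey, mset_build n _ i j _ (by omega) hjn]
    simp only [stT, Prod.mk.injEq]
    refine ⟨by first | rfl | trivial, ?_, ?_⟩
    · apply build_congr
      intro x hx y hy
      by_cases hc : x = i ∧ y = j
      · obtain ⟨rfl, rfl⟩ := hc
        rw [if_pos ⟨rfl, rfl⟩, if_pos ⟨Or.inr ⟨rfl, rfl⟩, hij⟩]
        simp [pspec, hgt]
      · rw [if_neg hc,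
          if_congr (and_congr_left (fun _ => (or_iff_left hc).symm)) rfl rfl]
    · apply build_congr
      intro x hx y hy
      by_cases hc : x = i ∧ y = j
      · obtain ⟨rfl, rfl⟩ := hc
        split_ifs <;> simp [bspec, hgt]
      · rw [if_congr (and_congr_left (fun _ => (or_iff_left hc).symm)) rfl rfl]

-- memo lookups only grow along the run
lemma isSome_insert_mono (memo : PySem.Dict (Nat × Nat) Int) (k c : Nat × Nat) (v : Int)
    (h : (memo.get? c).isSome = true) : ((memo.insert k v).get? c).isSome = true := by
  rw [PySem.Dict.get?_insert]
  split
  · rfl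
  · exact h

lemma isSome_insert_self (memo : PySem.Dict (Nat × Nat) Int) (k : Nat × Nat) (v : Int) :
    ((memo.insert k v).get? k).isSome = true := by
  rw [PySem.Dict.get?_insert_self]; rfl

lemma bDepCells_bounds (n i j : Nat) (hij : i < j) (hjn : j < n) :
    ∀ c ∈ bDepCells i j, c.1 < n ∧ c.2 < n := by
  intro c hc
  simp only [bDepCells, List.mem_append, List.mem_cons, List.mem_flatMap, List.mem_range'] at hc
  rcases hc with (rfl | rfl | rfl | h) | ⟨k, ⟨t, ht, rfl⟩, hk⟩
  · constructor <;> simp <;> omega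
  · constructor <;> simp <;> omega
  · constructor <;> simp <;> omega
  · simp at h
  · simp at hk
    rcases hk with rfl | rfl <;> constructor <;> simp <;> omega

-- the main invariant-preservation run of the stack machine
lemma runB_spec (s : List Char) (n : Nat) : ∀ N (st : List (Nat × Nat × Bool))
    (memo : PySem.Dict (Nat × Nat) Int) (mats : List (List Int) × List (List Int) × List (List Int)),
    stkWt st < N →
    (∀ x y v, memo.get? (x, y) = some v → v = dspec s x y) →
    (∀ x y, MS memo x y → x < y → ∀ d ∈ bDepCells x y, (memo.get? d).isSome = true) →
    mats = stT s n (MS memo) →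
    (∀ f ∈ st, f.1 < n ∧ f.2.1 < n) →
    StackOK (fun c => (memo.get? c).isSome = true) st →
    (∀ x y v, (runB s memo mats st).1.get? (x, y) = some v → v = dspec s x y) ∧
    (∀ x y, MS (runB s memo mats st).1 x y → x < y →
        ∀ d ∈ bDepCells x y, ((runB s memo mats st).1.get? d).isSome = true) ∧
    (runB s memo mats st).2 = stT s n (MS (runB s memo mats st).1) ∧
    (∀ c : Nat × Nat, (memo.get? c).isSome = true → ((runB s memo mats st).1.get? c).isSome = true) ∧
    (∀ f ∈ st, ((runB s memo mats st).1.get? (f.1, f.2.1)).isSome = true) := by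
  intro N
  induction N with
  | zero => intro st memo mats h; omega
  | succ N ih =>
    intro st memo mats hN hval hcl hmats hbnd hok
    match st with
    | [] =>
      rw [runB]
      exact ⟨hval, hcl, hmats, fun c h => h, by simp⟩
    | (i, j, ready) :: rest =>
      obtain ⟨hhead, htail⟩ := hok
      have hbij := hbnd (i, j, ready) (List.mem_cons_self ..)
      by_cases hr : ready = true
      · -- compute frame
        subst hr
        obtain ⟨hij, hdeps⟩ := hhead rfl
        have hstep : runB s memo mats ((i, j, true) :: rest)
            = runB s (readyCell s memo mats i j).1 (readyCell s memo mats i j).2 rest := by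
          rw [runB]; rfl
        have hready := readyCell_eq s n i j memo hij hbij.2 hval hdeps
        rw [hmats] at hstep ⊢
        rw [hready] at hstep
        rw [hstep]
        have hval' : ∀ x y v, (memo.insert (i, j) (mspec s i j)).get? (x, y) = some v → v = dspec s x y := by
          intro x y v h
          rw [PySem.Dict.get?_insert] at h
          split at h
          · rename_i he
            obtain ⟨rfl, rfl⟩ : x = i ∧ y = j := by simpa [Prod.ext_iff] using he
            obtain rfl : mspec s x y = v := by injection h
            exact (dspec_eq s x y hij).symm
          · exact hval x y v h
        have hcl' : ∀ x y, MS (memo.insert (i, j) (mspec s i j)) x y → x < y →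
            ∀ d ∈ bDepCells x y, ((memo.insert (i, j) (mspec s i j)).get? d).isSome = true := by
          intro x y hxy hlt d hd
          rcases (MS_insert memo i j x y _).mp hxy with hm | ⟨rfl, rfl⟩
          · exact isSome_insert_mono _ _ _ _ (hcl x y hm hlt d hd)
          · exact isSome_insert_mono _ _ _ _ (hdeps d hd)
        have hok' : StackOK (fun c => ((memo.insert (i, j) (mspec s i j)).get? c).isSome = true) rest := by
          refine StackOK_mono rest _ _ ?_ htail
          intro c hc
          rcases hc with hm | rfl
          · exact isSome_insert_mono _ _ _ _ hm
          · exact isSome_insert_self _ _ _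
        have hwt : stkWt rest < N := by
          have h1 : frWt (i, j, true) = 1 := rfl
          rw [stkWt_cons, h1] at hN
          omega
        obtain ⟨c1, c2, c3, c4, c5⟩ := ih rest (memo.insert (i, j) (mspec s i j)) _ hwt hval' hcl' rfl
          (fun f hf => hbnd f (List.mem_cons_of_mem _ hf)) hok'
        refine ⟨c1, c2, c3, ?_, ?_⟩
        · intro c hc
          exact c4 c (isSome_insert_mono _ _ _ _ hc)
        · intro f hf
          rcases List.mem_cons.mp hf with rfl | hf'
          · exact c4 _ (isSome_insert_self _ _ _)
          · exact c5 f hf'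
      · have hrf : ready = false := by simpa using hr
        subst hrf
        have hwt : stkWt rest < N := by
          have h1 : frWt (i, j, false) = Fw (j - i) := rfl
          have h2 := Fw_two (j - i)
          rw [stkWt_cons, h1] at hN
          omega
        by_cases hmem : (memo.get? (i, j)).isSome = true
        · -- already memoized: skip
          have hstep : runB s memo mats ((i, j, false) :: rest) = runB s memo mats rest := by
            rw [runB]; simp [hmem]
          rw [hstep]
          have hok' : StackOK (fun c => (memo.get? c).isSome = true) rest := by
            refine StackOK_mono rest _ _ ?_ htail
            intro c hc
            rcases hc with hm | rfl
            · exact hm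
            · exact hmem
          obtain ⟨c1, c2, c3, c4, c5⟩ := ih rest memo mats hwt hval hcl hmats
            (fun f hf => hbnd f (List.mem_cons_of_mem _ hf)) hok'
          exact ⟨c1, c2, c3, c4, fun f hf => by
            rcases List.mem_cons.mp hf with rfl | hf'
            · exact c4 _ hmem
            · exact c5 f hf'⟩
        · by_cases hle : j ≤ i
          · -- base cell: memoize 0
            have hstep : runB s memo mats ((i, j, false) :: rest)
                = runB s (memo.insert (i, j) 0) mats rest := by
              rw [runB]; simp [hmem, hle]
            rw [hstep]
            have hval' : ∀ x y v, (memo.insert (i, j) 0).get? (x, y) = some v → v = dspec s x y := by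
              intro x y v h
              rw [PySem.Dict.get?_insert] at h
              split at h
              · rename_i he
                obtain ⟨rfl, rfl⟩ : x = i ∧ y = j := by simpa [Prod.ext_iff] using he
                obtain rfl : (0 : Int) = v := by injection h
                exact (dspec_lower s x y hle).symm
              · exact hval x y v h
            have hcl' : ∀ x y, MS (memo.insert (i, j) 0) x y → x < y →
                ∀ d ∈ bDepCells x y, ((memo.insert (i, j) 0).get? d).isSome = true := by
              intro x y hxy hlt d hd
              rcases (MS_insert memo i j x y _).mp hxy with hm | ⟨rfl, rfl⟩
              · exact isSome_insert_mono _ _ _ _ (hcl x y hm hlt d hd)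
              · omega
            have hmats' : mats = stT s n (MS (memo.insert (i, j) 0)) := by
              rw [hmats]
              refine stT_congr s n _ _ ?_
              intro x y _ _ hxy
              rw [MS_insert]
              constructor
              · exact Or.inl
              · rintro (hm | ⟨rfl, rfl⟩)
                · exact hm
                · omega
            have hok' : StackOK (fun c => ((memo.insert (i, j) 0).get? c).isSome = true) rest := by
              refine StackOK_mono rest _ _ ?_ htail
              intro c hc
              rcases hc with hm | rfl
              · exact isSome_insert_mono _ _ _ _ hm
              · exact isSome_insert_self _ _ _
            obtain ⟨c1, c2, c3, c4, c5⟩ := ih rest (memo.insert (i, j) 0) mats hwt hval' hcl' hmats'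
              (fun f hf => hbnd f (List.mem_cons_of_mem _ hf)) hok'
            refine ⟨c1, c2, c3, ?_, ?_⟩
            · intro c hc
              exact c4 c (isSome_insert_mono _ _ _ _ hc)
            · intro f hf
              rcases List.mem_cons.mp hf with rfl | hf'
              · exact c4 _ (isSome_insert_self _ _ _)
              · exact c5 f hf'
          · -- expand frame
            have hij : i < j := by omega
            have hstep : runB s memo mats ((i, j, false) :: rest)
                = runB s memo mats ((bDeps i j).reverse ++ (i, j, true) :: rest) := by
              rw [runB]; simp [hmem, hle]
            rw [hstep]
            have hwt' : stkWt ((bDeps i j).reverse ++ (i, j, true) :: rest) < N := by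
              have hb := bDeps_wt i j hij
              have h1 : frWt (i, j, false) = Fw (j - i) := rfl
              have h2 : frWt (i, j, true) = 1 := rfl
              rw [stkWt_append, stkWt_reverse, stkWt_cons, h2]
              rw [stkWt_cons, h1] at hN
              omega
            have hbnd' : ∀ f ∈ (bDeps i j).reverse ++ (i, j, true) :: rest, f.1 < n ∧ f.2.1 < n := by
              intro f hf
              rcases List.mem_append.mp hf with hf1 | hf2
              · rw [List.mem_reverse] at hf1
                simp only [bDeps, List.mem_map] at hf1
                obtain ⟨c, hc, rfl⟩ := hf1
                exact bDepCells_bounds n i j hij hbij.2 c hc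
              · rcases List.mem_cons.mp hf2 with rfl | hf3
                · exact ⟨hbij.1, hbij.2⟩
                · exact hbnd f (List.mem_cons_of_mem _ hf3)
            have hok' : StackOK (fun c => (memo.get? c).isSome = true)
                ((bDeps i j).reverse ++ (i, j, true) :: rest) := by
              have hmaprev : (bDeps i j).reverse
                  = ((bDepCells i j).reverse).map (fun c => (c.1, c.2, false)) := by
                rw [bDeps, List.map_reverse]
              rw [hmaprev]
              refine StackOK_false_prefix _ _ _ ?_
              refine ⟨?_, ?_⟩
              · intro _
                refine ⟨hij, fun d hd => Or.inr (List.mem_reverse.mpr hd)⟩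
              · refine StackOK_mono rest _ _ ?_ htail
                intro c hc
                rcases hc with hm | rfl
                · exact Or.inl (Or.inl hm)
                · exact Or.inr rfl
            obtain ⟨c1, c2, c3, c4, c5⟩ := ih ((bDeps i j).reverse ++ (i, j, true) :: rest)
              memo mats hwt' hval hcl hmats hbnd' hok'
            refine ⟨c1, c2, c3, c4, ?_⟩
            intro f hf
            rcases List.mem_cons.mp hf with rfl | hf'
            · exact c5 (i, j, true) (List.mem_append_right _ (List.mem_cons_self ..))
            · exact c5 f (List.mem_append_right _ (List.mem_cons_of_mem _ hf'))

-- memo-closure together with the root cell forces every upper cell to be memoized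
lemma reach (memo : PySem.Dict (Nat × Nat) Int) (n : Nat)
    (hcl : ∀ x y, MS memo x y → x < y → ∀ d ∈ bDepCells x y, (memo.get? d).isSome = true)
    (hroot : (memo.get? (0, n-1)).isSome = true) :
    ∀ m x y, x < y → y < n → x + (n - 1 - y) ≤ m → MS memo x y := by
  intro m
  induction m with
  | zero =>
    intro x y hxy hyn hm
    obtain rfl : x = 0 := by omega
    obtain rfl : y = n - 1 := by omega
    exact hroot
  | succ m ih =>
    intro x y hxy hyn hm
    by_cases hy : y = n - 1
    · subst hy
      by_cases hx : x = 0
      · subst hx; exact hroot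
      · have h1 : MS memo (x-1) (n-1) := ih (x-1) (n-1) (by omega) (by omega) (by omega)
        have hmem : ((x, n-1) : Nat × Nat) ∈ bDepCells (x-1) (n-1) := by
          have := mem_dep_head2 (x-1) (n-1)
          rwa [show x - 1 + 1 = x from by omega] at this
        exact hcl (x-1) (n-1) h1 (by omega) (x, n-1) hmem
    · have h1 : MS memo x (y+1) := ih x (y+1) (by omega) (by omega) (by omega)
      have hmem : ((x, y) : Nat × Nat) ∈ bDepCells x (y+1) := by
        have := mem_dep_head3 x (y+1)
        rwa [show y + 1 - 1 = y from by omega] at this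
      exact hcl x (y+1) h1 (by omega) (x, y) hmem

-- ===== VERDICT (by name: the statement is the Claim_ definition above) =====
theorem nussinov_fold_spec : Claim_equal_nussinov_fold := by
  intro a _
  unfold Spec_nussinov_fold
  simp only [nussinov_fold, nussinov_fold_alt]
  rcases Nat.eq_zero_or_pos a.toList.length with hn | hn
  · simp [hn]
  · rw [if_neg (by omega)]
    have hA : ((List.range (a.toList.length - 1)).reverse).foldl (rowA a.toList a.toList.length)
        (List.replicate a.toList.length (List.replicate a.toList.length (0 : Int)),
         List.replicate a.toList.length (List.replicate a.toList.length (0 : Int)),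
         List.replicate a.toList.length (List.replicate a.toList.length (0 : Int)))
        = stT a.toList a.toList.length (fun x y => 0 ≤ x) := by
      rw [zeros_eq_stT a.toList a.toList.length (fun x y => a.toList.length - 1 ≤ x)
            (by intro x y hx hy hxy; omega),
          outerA a.toList a.toList.length (a.toList.length - 1) (by omega)]
    rw [hA]
    have hz : (List.replicate a.toList.length (List.replicate a.toList.length (0 : Int)),
         List.replicate a.toList.length (List.replicate a.toList.length (0 : Int)),
         List.replicate a.toList.length (List.replicate a.toList.length (0 : Int)))
        = stT a.toList a.toList.length (MS (PySem.Dict.empty : PySem.Dict (Nat × Nat) Int)) := by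
      refine zeros_eq_stT a.toList a.toList.length _ ?_
      intro x y _ _ _
      simp [MS, PySem.Dict.get?_empty]
    obtain ⟨c1, c2, c3, c4, c5⟩ := runB_spec a.toList a.toList.length
      (stkWt [(0, a.toList.length - 1, false)] + 1) [(0, a.toList.length - 1, false)]
      PySem.Dict.empty _ (by omega)
      (by intro x y v h; rw [PySem.Dict.get?_empty] at h; cases h)
      (by intro x y h; simp [MS, PySem.Dict.get?_empty] at h)
      hz
      (by intro f hf
          simp only [List.mem_singleton] at hf
          subst hf
          exact ⟨hn, show a.toList.length - 1 < a.toList.length by omega⟩)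
      ⟨by simp, trivial⟩
    have hroot := c5 (0, a.toList.length - 1, false) (List.mem_cons_self ..)
    rw [c3]
    refine stT_congr a.toList a.toList.length _ _ ?_
    intro x y hx hy hxy
    refine iff_of_true (by omega) ?_
    exact reach _ a.toList.length c2 hroot (x + (a.toList.length - 1 - y)) x y hxy hy le_rfl
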